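-- pv_equiv track=rewrite | github.com/mahig1705/esg | core/sg_evidence.py | _disclosure_stage
-- ===== SOURCE A (Python) =====
-- from typing import Any, Dict, List, Optional
--
-- def _disclosure_stage(facts: List[Dict[str, Any]]) -> str:
--     policy = any(f.get("policy_present") for f in facts)
--     metric = any(f.get("metric_present") for f in facts)
--     assurance = any(f.get("assurance_present") for f in facts)
--     if not facts:
--         return "no_disclosure"
--     if policy and metric and assurance:
--         return "policy_metric_assurance"
--     if policy and metric:
--         return "policy_and_metric"
--     if policy:
--         return "policy_only"
--     if metric:
--         return "metric_only"
--     return "mention_only"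
-- ===== SOURCE B (Python) =====
-- _STAGE_TABLE = [
--     "mention_only",            # 0b000
--     "mention_only",            # 0b001 assurance only
--     "metric_only",             # 0b010
--     "metric_only",             # 0b011
--     "policy_only",             # 0b100
--     "policy_only",             # 0b101
--     "policy_and_metric",       # 0b110
--     "policy_metric_assurance", # 0b111
-- ]
--
-- def _disclosure_stage(facts):
--     if not facts:
--         return "no_disclosure"
--     mask = 0
--     for f in facts:
--         mask |= ((4 if f.get("policy_present") else 0)
--                  | (2 if f.get("metric_present") else 0)
--                  | (1 if f.get("assurance_present") else 0))
--     return _STAGE_TABLE[mask]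
-- ===== Notes on version B (the rewrite author's own statement) =====
-- stated objective: alternative
-- what changed: Replaces the three any() scans plus the five-branch if-ladder with a single pass that ORs each fact into a 3-bit presence mask and returns the stage by indexing an 8-entry lookup table with that mask.
import Mathlib
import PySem

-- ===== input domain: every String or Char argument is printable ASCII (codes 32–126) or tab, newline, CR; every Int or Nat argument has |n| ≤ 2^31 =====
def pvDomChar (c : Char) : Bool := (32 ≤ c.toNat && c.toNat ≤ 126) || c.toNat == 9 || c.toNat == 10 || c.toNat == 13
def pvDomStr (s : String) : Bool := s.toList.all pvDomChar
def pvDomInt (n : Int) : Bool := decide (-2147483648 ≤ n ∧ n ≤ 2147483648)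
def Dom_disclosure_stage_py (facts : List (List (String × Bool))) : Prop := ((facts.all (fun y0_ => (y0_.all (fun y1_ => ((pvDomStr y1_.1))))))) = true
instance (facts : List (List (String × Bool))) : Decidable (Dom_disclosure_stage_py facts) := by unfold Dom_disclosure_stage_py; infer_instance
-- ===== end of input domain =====

-- B replaces the three any() scans and the if-ladder with one pass ORing each fact into a 3-bit mask and an 8-entry table lookup; same return value everywhere.

-- ===== PORT A =====
-- f.get(k) truthiness: a missing key is None (falsy), so the flag is (f.lookup k).getD false (first match = dict lookup)
def pvFlagA (f : List (String × Bool)) (k : String) : Bool :=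
  (f.lookup k).getD false

def disclosure_stage_py (facts : List (List (String × Bool))) : String :=
  let policy := facts.any (fun f => pvFlagA f "policy_present")
  let metric := facts.any (fun f => pvFlagA f "metric_present")
  let assurance := facts.any (fun f => pvFlagA f "assurance_present")
  if facts.isEmpty then "no_disclosure"
  else if policy && metric && assurance then "policy_metric_assurance"
  else if policy && metric then "policy_and_metric"
  else if policy then "policy_only"
  else if metric then "metric_only"
  else "mention_only"

-- ===== PORT B =====
def pvStageTable : List String :=
  ["mention_only", "mention_only", "metric_only", "metric_only",
   "policy_only", "policy_only", "policy_and_metric", "policy_metric_assurance"]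

-- one fact's 3-bit contribution: 4*policy | 2*metric | 1*assurance
def pvFMask (f : List (String × Bool)) : Nat :=
  (cond ((f.lookup "policy_present").getD false) 4 0) |||
  (cond ((f.lookup "metric_present").getD false) 2 0) |||
  (cond ((f.lookup "assurance_present").getD false) 1 0)

-- the single pass: mask |= fmask(f)
def pvMaskLoop : List (List (String × Bool)) → Nat → Nat
  | [], acc => acc
  | f :: rest, acc => pvMaskLoop rest (acc ||| pvFMask f)

def disclosure_stage_py_alt (facts : List (List (String × Bool))) : String :=
  if facts.isEmpty then "no_disclosure"
  else
    -- Python table[mask]; mask ≤ 7 always, so the none branch is unreachable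
    match PySem.List.pyGet? pvStageTable ((pvMaskLoop facts 0 : Nat) : Int) with
    | some s => s
    | none => ""

-- ===== PRECONDITION & SPEC =====
def Spec_disclosure_stage_py (facts : List (List (String × Bool))) (out : String) : Prop := out = disclosure_stage_py_alt facts
instance (facts : List (List (String × Bool))) (out : String) : Decidable (Spec_disclosure_stage_py facts out) := by unfold Spec_disclosure_stage_py; infer_instance

-- ===== CLAIM =====
def Claim_equal_disclosure_stage_py : Prop := ∀ (facts : List (List (String × Bool))), Dom_disclosure_stage_py facts → Spec_disclosure_stage_py facts (disclosure_stage_py facts)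

-- ===== LEMMAS AND PROOFS =====
-- encoding of three flags as a 3-bit mask
def pvEnc (p m a : Bool) : Nat := (cond p 4 0) ||| (cond m 2 0) ||| (cond a 1 0)

lemma pvEnc_lor (p1 m1 a1 p2 m2 a2 : Bool) :
    pvEnc p1 m1 a1 ||| pvEnc p2 m2 a2 = pvEnc (p1 || p2) (m1 || m2) (a1 || a2) := by
  cases p1 <;> cases m1 <;> cases a1 <;> cases p2 <;> cases m2 <;> cases a2 <;> decide

lemma pvFMask_eq_enc (f : List (String × Bool)) :
    pvFMask f = pvEnc (pvFlagA f "policy_present") (pvFlagA f "metric_present")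
      (pvFlagA f "assurance_present") := rfl

lemma pvMaskLoop_enc (facts : List (List (String × Bool))) (p m a : Bool) :
    pvMaskLoop facts (pvEnc p m a) =
      pvEnc (p || facts.any (fun f => pvFlagA f "policy_present"))
            (m || facts.any (fun f => pvFlagA f "metric_present"))
            (a || facts.any (fun f => pvFlagA f "assurance_present")) := by
  induction facts generalizing p m a with
  | nil => simp [pvMaskLoop]
  | cons f rest ih =>
    simp only [pvMaskLoop, pvFMask_eq_enc, pvEnc_lor, List.any_cons, ih, Bool.or_assoc]

theorem pv_spec_aux (facts : List (List (String × Bool))) :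
    disclosure_stage_py facts = disclosure_stage_py_alt facts := by
  unfold disclosure_stage_py disclosure_stage_py_alt
  have h0 : (0 : Nat) = pvEnc false false false := rfl
  rw [h0, pvMaskLoop_enc]
  simp only [Bool.false_or]
  cases facts.isEmpty
  · simp only [if_false, Bool.false_eq_true]
    cases hp : facts.any (fun f => pvFlagA f "policy_present") <;>
    cases hm : facts.any (fun f => pvFlagA f "metric_present") <;>
    cases ha : facts.any (fun f => pvFlagA f "assurance_present") <;>
      simp [pvEnc, pvStageTable, PySem.List.pyGet?, PySem.List.pyIdx?]
  · simp

-- ===== VERDICT =====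
theorem disclosure_stage_py_spec : Claim_equal_disclosure_stage_py := by
  intro facts _
  unfold Spec_disclosure_stage_py
  exact pv_spec_aux facts
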